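-- pv_equiv track=rewrite | github.com/Fanaticaj/mewcat_tracker | decompress.py | score_stats
-- ===== SOURCE A (Python) =====
-- from typing import List, Optional, Dict, Any, Tuple
--
-- def score_stats(vals: List[int]) -> int:
--     """
--     Score candidate stat arrays. You observed base stats cap at 7.
--     """
--     if all(0 <= v <= 7 for v in vals):
--         return 100
--     if all(0 <= v <= 20 for v in vals):
--         return 50
--     if any(v >= 1_000_000 for v in vals):
--         return -100
--     return 0
-- ===== SOURCE B (Python) =====
-- def score_stats(vals):
--     # Classify each value into a severity code (higher = worse), join with max
--     # in ONE pass, and map the worst code through a fixed score table.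
--     def sev(v):
--         if 0 <= v <= 7:
--             return 0
--         if 0 <= v <= 20:
--             return 1
--         if v >= 1_000_000:
--             return 3
--         return 2
--     worst = 0
--     for v in vals:
--         s = sev(v)
--         if s > worst:
--             worst = s
--     return (100, 50, 0, -100)[worst]
-- ===== Notes on version B (the rewrite author's own statement) =====
-- stated objective: alternative
-- what changed: Replaces A's staged whole-list scans (two all() and one any()) by a per-element severity classification joined with max in one pass, with the final score read from a fixed 4-entry table.
import Mathlib
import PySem

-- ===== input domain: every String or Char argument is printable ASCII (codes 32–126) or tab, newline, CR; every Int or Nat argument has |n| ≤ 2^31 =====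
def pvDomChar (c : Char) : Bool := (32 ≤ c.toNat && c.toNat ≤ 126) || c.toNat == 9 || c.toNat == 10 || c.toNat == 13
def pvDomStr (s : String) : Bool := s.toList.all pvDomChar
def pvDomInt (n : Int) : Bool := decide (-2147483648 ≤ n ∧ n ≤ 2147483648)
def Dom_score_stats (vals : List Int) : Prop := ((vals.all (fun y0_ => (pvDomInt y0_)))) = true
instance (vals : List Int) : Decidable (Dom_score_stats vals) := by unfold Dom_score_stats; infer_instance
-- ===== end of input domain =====

-- B replaces A's staged all/any scans by a per-element severity code joined with max in one pass, read off a score table (objective: alternative).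


-- ===== PORT A =====
def score_stats (vals : List Int) : Int :=
  if vals.all (fun v => decide (0 ≤ v) && decide (v ≤ 7)) then 100
  else if vals.all (fun v => decide (0 ≤ v) && decide (v ≤ 20)) then 50
  else if vals.any (fun v => decide (1000000 ≤ v)) then -100
  else 0

-- ===== PORT B =====
-- severity of one value: 0 = base-stat range, 1 = plausible, 3 = absurdly large, 2 = other
def pvSev (v : Int) : Nat :=
  if 0 ≤ v ∧ v ≤ 7 then 0
  else if 0 ≤ v ∧ v ≤ 20 then 1
  else if 1000000 ≤ v then 3
  else 2

def score_stats_alt (vals : List Int) : Int :=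
  let worst := vals.foldl (fun w v => if pvSev v > w then pvSev v else w) 0
  match worst with
  | 0 => 100
  | 1 => 50
  | 2 => 0
  | _ => -100

-- ===== PRECONDITION & SPEC =====
def Spec_score_stats (vals : List Int) (out : Int) : Prop := out = score_stats_alt vals
instance (vals : List Int) (out : Int) : Decidable (Spec_score_stats vals out) := by unfold Spec_score_stats; infer_instance

-- ===== CLAIM (what is proved, stated in full; the proofs are below) =====
def Claim_equal_score_stats : Prop := ∀ (vals : List Int), Dom_score_stats vals → Spec_score_stats vals (score_stats vals)

-- ===== LEMMAS AND PROOFS =====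

theorem foldl_if_eq_max (vals : List Int) (w0 : Nat) :
    vals.foldl (fun w v => if pvSev v > w then pvSev v else w) w0 =
      vals.foldl (fun w v => max w (pvSev v)) w0 := by
  induction vals generalizing w0 with
  | nil => rfl
  | cons v vs ih =>
    simp only [List.foldl_cons, ih]
    congr 1
    rcases Nat.lt_or_ge w0 (pvSev v) with h | h
    · simp [h, Nat.max_eq_right h.le]
    · simp [Nat.not_lt.mpr h, Nat.max_eq_left h]

theorem worst_le_iff (vals : List Int) (w0 k : Nat) :
    vals.foldl (fun w v => if pvSev v > w then pvSev v else w) w0 ≤ k ↔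
      w0 ≤ k ∧ ∀ x ∈ vals, pvSev x ≤ k := by
  rw [foldl_if_eq_max]
  induction vals generalizing w0 with
  | nil => simp
  | cons v vs ih =>
    simp only [List.foldl_cons, ih, max_le_iff, List.mem_cons]
    constructor
    · rintro ⟨⟨h1, h2⟩, h3⟩
      exact ⟨h1, fun y hy => hy.elim (fun e => e ▸ h2) (h3 y)⟩
    · rintro ⟨h1, h2⟩
      exact ⟨⟨h1, h2 v (Or.inl rfl)⟩, fun y hy => h2 y (Or.inr hy)⟩

theorem le_worst_iff (vals : List Int) (w0 k : Nat) :
    k ≤ vals.foldl (fun w v => if pvSev v > w then pvSev v else w) w0 ↔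
      k ≤ w0 ∨ ∃ x ∈ vals, k ≤ pvSev x := by
  rw [foldl_if_eq_max]
  induction vals generalizing w0 with
  | nil => simp
  | cons v vs ih =>
    simp only [List.foldl_cons, ih, le_max_iff, List.mem_cons]
    constructor
    · rintro (h | ⟨y, hy, h⟩)
      · exact h.elim Or.inl (fun h => Or.inr ⟨v, Or.inl rfl, h⟩)
      · exact Or.inr ⟨y, Or.inr hy, h⟩
    · rintro (h | ⟨y, hy, h⟩)
      · exact Or.inl (Or.inl h)
      · rcases hy with rfl | hy
        · exact Or.inl (Or.inr h)
        · exact Or.inr ⟨y, hy, h⟩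

theorem pvSev_eq_zero_iff (v : Int) : pvSev v = 0 ↔ (0 ≤ v ∧ v ≤ 7) := by
  unfold pvSev; split_ifs <;> simp_all

theorem pvSev_le_one_iff (v : Int) : pvSev v ≤ 1 ↔ (0 ≤ v ∧ v ≤ 20) := by
  unfold pvSev; split_ifs with h1 h2 <;> simp <;> omega

theorem three_le_pvSev_iff (v : Int) : 3 ≤ pvSev v ↔ 1000000 ≤ v := by
  unfold pvSev; split_ifs with h1 h2 h3 <;> simp <;> omega

theorem pvSev_le_three (v : Int) : pvSev v ≤ 3 := by
  unfold pvSev; split_ifs <;> omega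

-- ===== VERDICT (by name: the statement is the Claim_ definition above) =====
theorem score_stats_spec : Claim_equal_score_stats := by
  intro vals _
  unfold Spec_score_stats score_stats score_stats_alt
  simp only [List.all_eq_true, List.any_eq_true, Bool.and_eq_true, decide_eq_true_eq]
  set W := vals.foldl (fun w v => if pvSev v > w then pvSev v else w) 0 with hW
  have hle3 : W ≤ 3 := by
    rw [hW, worst_le_iff]; exact ⟨by omega, fun x _ => pvSev_le_three x⟩
  have h0 : (∀ v ∈ vals, 0 ≤ v ∧ v ≤ 7) ↔ W = 0 := by
    rw [show (W = 0) ↔ W ≤ 0 by omega, hW, worst_le_iff]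
    simp [pvSev_eq_zero_iff]
  have h1 : (∀ v ∈ vals, 0 ≤ v ∧ v ≤ 20) ↔ W ≤ 1 := by
    rw [hW, worst_le_iff]
    simp [pvSev_le_one_iff]
  have h3 : (∃ v ∈ vals, 1000000 ≤ v) ↔ 3 ≤ W := by
    rw [hW, le_worst_iff]
    simp [three_le_pvSev_iff]
  by_cases c0 : W = 0
  · simp [h0, c0]
  · by_cases c1 : W = 1
    · rw [if_neg, if_pos (h1.mpr (by omega))]
      · simp [c1]
      · simp [h0, c0]
    · by_cases c3 : W = 3
      · rw [if_neg, if_neg, if_pos (h3.mpr (by omega))]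
        · simp [c3]
        · simp [h1]; omega
        · simp [h0, c0]
      · have : W = 2 := by omega
        rw [if_neg, if_neg, if_neg]
        · simp [this]
        · simp [h3]; omega
        · simp [h1]; omega
        · simp [h0, c0]
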